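-- pv_equiv track=rewrite | github.com/daniel-reich/turbo-robot | Jjpou65vd6t6xGwvN_9.py | get_case
-- ===== SOURCE A (Python) =====
-- def get_case(txt):
--   sCase=""
--   tmpCase=""
--   cnt=0
--   a=len(txt)
--   for i in range(0,a):
--     if(txt[i].isalpha()):
--       if(txt[i].islower()):
--         sCase="lower"
--       else:
--         sCase="upper"
--       if(cnt>0):
--         if(tmpCase!=sCase):
--           return "mixed"
--       cnt=cnt+1
--       tmpCase=sCase
--   return sCase
-- ===== SOURCE B (Python) =====
-- def get_case(txt):
--     letters = [c for c in txt if c.isalpha()]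
--     if not letters:
--         return ""
--     low = sum(1 for c in letters if c.islower())
--     if low == len(letters):
--         return "lower"
--     if low == 0:
--         return "upper"
--     return "mixed"
-- ===== Notes on version B (the rewrite author's own statement) =====
-- stated objective: simpler
-- what changed: Replaces A's stateful loop (previous-case tracking with early 'mixed' return) by a filter-then-count decomposition: extract the letters, count the lowercase ones, and classify by comparing that count to 0 and to the number of letters.
import Mathlib
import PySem

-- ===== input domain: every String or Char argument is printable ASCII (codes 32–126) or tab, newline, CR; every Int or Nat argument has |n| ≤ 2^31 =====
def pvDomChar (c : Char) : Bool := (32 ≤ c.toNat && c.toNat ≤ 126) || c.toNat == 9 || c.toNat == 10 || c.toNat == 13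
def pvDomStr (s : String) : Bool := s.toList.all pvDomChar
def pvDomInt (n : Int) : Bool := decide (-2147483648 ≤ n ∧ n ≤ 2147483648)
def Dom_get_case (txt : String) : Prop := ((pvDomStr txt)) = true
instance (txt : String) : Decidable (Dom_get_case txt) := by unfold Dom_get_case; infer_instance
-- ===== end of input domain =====

-- B is simpler: filter-then-count classification instead of A's stateful previous-case loop.

-- ===== PORT A =====
-- loop over the characters carrying (sCase, tmpCase, cnt); early return "mixed"
def getCaseGo : List Char → String → String → Int → String
  | [], sCase, _, _ => sCase
  | c :: rest, sCase, tmpCase, cnt =>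
    if PySem.Chars.isalpha c then
      let s' := if PySem.Chars.islower c then "lower" else "upper"
      if cnt > 0 && tmpCase != s' then "mixed"
      else getCaseGo rest s' s' (cnt + 1)
    else getCaseGo rest sCase tmpCase cnt

def get_case (txt : String) : String := getCaseGo txt.toList "" "" 0

-- ===== PORT B =====
def get_case_alt (txt : String) : String :=
  let letters := txt.toList.filter (fun c => PySem.Chars.isalpha c)
  if letters = [] then ""
  else
    let low := letters.countP (fun c => PySem.Chars.islower c)
    if low = letters.length then "lower"
    else if low = 0 then "upper"
    else "mixed"

-- ===== PRECONDITION & SPEC =====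
def Spec_get_case (txt : String) (out : String) : Prop := out = get_case_alt txt
instance (txt : String) (out : String) : Decidable (Spec_get_case txt out) := by unfold Spec_get_case; infer_instance

-- ===== CLAIM (what is proved, stated in full; the proofs are below) =====
def Claim_equal_get_case : Prop := ∀ (txt : String), Dom_get_case txt → Spec_get_case txt (get_case txt)

-- ===== LEMMAS AND PROOFS =====

-- the case label A assigns to a letter
def caseStr (c : Char) : String := if PySem.Chars.islower c then "lower" else "upper"

-- once a letter has been seen (cnt > 0, tmpCase = sCase = s),
-- A returns s iff every remaining letter has case s, else "mixed"
lemma getCaseGo_run (l : List Char) (s : String) (cnt : Int) (hcnt : 0 < cnt) :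
    getCaseGo l s s cnt =
      if (l.filter (fun c => PySem.Chars.isalpha c)).all (fun c => caseStr c == s)
      then s else "mixed" := by
  induction l generalizing cnt with
  | nil => simp [getCaseGo]
  | cons c rest ih =>
    by_cases ha : PySem.Chars.isalpha c = true
    · rw [List.filter_cons_of_pos ha, List.all_cons]
      by_cases hcs : caseStr c = s
      · have hbeq : (caseStr c == s) = true := by simp [hcs]
        rw [hbeq, Bool.true_and]
        have hstep : getCaseGo (c :: rest) s s cnt = getCaseGo rest s s (cnt + 1) := by
          simp only [getCaseGo, ha, if_pos]
          have : (if PySem.Chars.islower c then "lower" else "upper") = s := hcs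
          simp [this]
        rw [hstep, ih (cnt + 1) (by omega)]
      · have hbeq : (caseStr c == s) = false := by
          simp only [beq_eq_false_iff_ne, ne_eq]; exact hcs
        rw [hbeq, Bool.false_and]
        have hstep : getCaseGo (c :: rest) s s cnt = "mixed" := by
          simp only [getCaseGo, ha, if_pos]
          have hne : (s != (if PySem.Chars.islower c then "lower" else "upper")) = true := by
            simpa [caseStr, bne_iff_ne] using (Ne.symm hcs)
          simp [hcnt, hne]
        rw [hstep]
        simp
    · rw [List.filter_cons_of_neg (by simpa using ha)]
      have hstep : getCaseGo (c :: rest) s s cnt = getCaseGo rest s s cnt := by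
        simp [getCaseGo, ha]
      rw [hstep, ih cnt hcnt]

-- the run lemma's classification equals B's count-based one, letters headed by c
lemma run_eq_count (rl : List Char) (c : Char) :
    (if rl.all (fun x => caseStr x == caseStr c) then caseStr c else "mixed") =
      (if (c :: rl).countP (fun x => PySem.Chars.islower x) = (c :: rl).length then "lower"
       else if (c :: rl).countP (fun x => PySem.Chars.islower x) = 0 then "upper"
       else "mixed") := by
  have hle := List.countP_le_length (p := fun x => PySem.Chars.islower x) (l := rl)
  by_cases hl : PySem.Chars.islower c = true
  · have hc : caseStr c = "lower" := by simp [caseStr, hl]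
    have hcc : (c :: rl).countP (fun x => PySem.Chars.islower x) =
        rl.countP (fun x => PySem.Chars.islower x) + 1 := by
      rw [List.countP_cons]; simp [hl]
    rw [hc]
    by_cases hall : rl.all (fun x => caseStr x == "lower") = true
    · have hcnt : rl.countP (fun x => PySem.Chars.islower x) = rl.length := by
        rw [List.countP_eq_length]
        intro a haa
        have := List.all_eq_true.mp hall a haa
        simp only [beq_iff_eq, caseStr] at this
        by_contra hxl
        simp [hxl] at this
      simp [hall, hcc, hcnt]
    · rcases (by simpa using hall :
        ∃ x ∈ rl, ¬ caseStr x = "lower") with ⟨x, hx, hxc⟩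
      have hxu : (PySem.Chars.islower x) = false := by
        by_contra h
        exact hxc (by simp [caseStr, eq_true_of_ne_false (by simpa using h)])
      have hlt : rl.countP (fun x => PySem.Chars.islower x) < rl.length := by
        rw [List.countP_lt_length_iff]; exact ⟨x, hx, by simp [hxu]⟩
      have h1 : ¬ ((c :: rl).countP (fun x => PySem.Chars.islower x) = rl.length + 1) := by
        rw [hcc]; omega
      have h2 : ¬ ((c :: rl).countP (fun x => PySem.Chars.islower x) = 0) := by
        rw [hcc]; omega
      simp [hall, h1, h2]
  · have hl' : PySem.Chars.islower c = false := by simpa using hl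
    have hc : caseStr c = "upper" := by simp [caseStr, hl']
    have hcc : (c :: rl).countP (fun x => PySem.Chars.islower x) =
        rl.countP (fun x => PySem.Chars.islower x) := by
      rw [List.countP_cons]; simp [hl']
    rw [hc]
    by_cases hall : rl.all (fun x => caseStr x == "upper") = true
    · have hcnt : rl.countP (fun x => PySem.Chars.islower x) = 0 := by
        rw [List.countP_eq_zero]
        intro a haa
        have := List.all_eq_true.mp hall a haa
        simp only [beq_iff_eq, caseStr] at this
        by_cases hal : PySem.Chars.islower a = true
        · simp [hal] at this
        · simpa using hal
      simp [hall, hcc, hcnt]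
    · rcases (by simpa using hall :
        ∃ x ∈ rl, ¬ caseStr x = "upper") with ⟨x, hx, hxc⟩
      have hxl : PySem.Chars.islower x = true := by
        by_contra h
        exact hxc (by simp [caseStr, (by simpa using h : PySem.Chars.islower x = false)])
      have hpos : 0 < rl.countP (fun x => PySem.Chars.islower x) := by
        rw [List.countP_pos_iff]; exact ⟨x, hx, hxl⟩
      have h1 : ¬ ((c :: rl).countP (fun x => PySem.Chars.islower x) = rl.length + 1) := by
        rw [hcc]; omega
      have h2 : ¬ ((c :: rl).countP (fun x => PySem.Chars.islower x) = 0) := by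
        rw [hcc]; omega
      simp [hall, h1, h2]

lemma getCaseGo_start (l : List Char) :
    getCaseGo l "" "" 0 =
      (let letters := l.filter (fun c => PySem.Chars.isalpha c)
       if letters = [] then ""
       else
         let low := letters.countP (fun c => PySem.Chars.islower c)
         if low = letters.length then "lower"
         else if low = 0 then "upper"
         else "mixed") := by
  induction l with
  | nil => simp [getCaseGo]
  | cons c rest ih =>
    by_cases ha : PySem.Chars.isalpha c = true
    · have hstep : getCaseGo (c :: rest) "" "" 0 =
          getCaseGo rest (caseStr c) (caseStr c) 1 := by
        simp [getCaseGo, ha, caseStr]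
      rw [hstep, getCaseGo_run rest (caseStr c) 1 (by omega)]
      simp only [List.filter_cons_of_pos ha]
      have hne : ¬ (c :: rest.filter (fun c => PySem.Chars.isalpha c) = []) := by simp
      simp only [hne, if_false]
      exact run_eq_count (rest.filter (fun c => PySem.Chars.isalpha c)) c
    · have hstep : getCaseGo (c :: rest) "" "" 0 = getCaseGo rest "" "" 0 := by
        simp [getCaseGo, ha]
      rw [hstep, ih]
      simp [List.filter_cons_of_neg (by simpa using ha)]

-- ===== VERDICT (by name: the statement is the Claim_ definition above) =====
theorem get_case_spec : Claim_equal_get_case := by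
  intro txt _
  unfold Spec_get_case get_case get_case_alt
  exact getCaseGo_start txt.toList
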